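-- pv_equiv track=rewrite | github.com/VaHiX/CodeForces | Python/ByRound/1948/1948_D_Tandem_Repeats.py | f
-- ===== SOURCE A (Python) =====
-- def f(s, m):
--     # Count consecutive valid matches for a tandem repeat of length 2*m
--     c = 0
--     for j in range(len(s) - m):  # iterate through possible start positions
--         # If either character is '?', or they match, increment counter
--         if s[j] != "?" and s[j + m] != "?" and s[j] != s[j + m]:
--             c = 0  # reset counter if mismatch and both are not '?'
--         else:
--             c += 1
--             if c == m:  # if we found m consecutive matching positions, we have a tandem repeat
--                 return 1
--     return 0
-- ===== SOURCE B (Python) =====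
-- def f(s, m):
--     # Tandem-repeat check via mismatch boundaries: collect mismatch positions,
--     # then inspect the gaps between consecutive mismatches (with sentinels).
--     if m < 1:
--         return 0
--     n = len(s)
--     mism = [j for j in range(n - m)
--             if s[j] != '?' and s[j + m] != '?' and s[j] != s[j + m]]
--     prev = -1
--     for j in mism + [n - m]:
--         if j - prev - 1 >= m:
--             return 1
--         prev = j
--     return 0
-- ===== Notes on version B (the rewrite author's own statement) =====
-- stated objective: alternative
-- what changed: B replaces A's running-counter scan (reset on mismatch, early return when the counter reaches m) by a collect-then-inspect decomposition: it first builds the list of mismatch positions, then walks consecutive mismatch boundaries (with sentinels -1 and len(s)-m) and returns 1 iff some gap between boundaries has length >= m.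
-- crash fix: A raises IndexError for every m < 0 (the loop runs past the end of s); B returns 0 there since no tandem repeat of negative length exists. — e.g. on f("ab", -1): A raises IndexError, B returns 0
import Mathlib
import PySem

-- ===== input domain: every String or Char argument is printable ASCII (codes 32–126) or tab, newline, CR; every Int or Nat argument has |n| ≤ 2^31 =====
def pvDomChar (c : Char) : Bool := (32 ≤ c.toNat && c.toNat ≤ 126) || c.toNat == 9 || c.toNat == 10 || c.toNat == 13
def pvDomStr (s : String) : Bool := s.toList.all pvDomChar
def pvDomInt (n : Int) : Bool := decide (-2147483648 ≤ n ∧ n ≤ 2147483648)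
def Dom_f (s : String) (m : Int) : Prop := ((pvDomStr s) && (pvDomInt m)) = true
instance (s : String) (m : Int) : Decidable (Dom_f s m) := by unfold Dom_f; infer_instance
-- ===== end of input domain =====

-- B replaces A's running-counter scan by a collect-mismatches-then-inspect-gaps
-- decomposition (objective: alternative, same O(n) cost).

-- ===== PORT A =====
-- A's for-loop with the running counter c and the early 'return 1'.
-- Character accesses are in range for every index the loop visits when 0 ≤ m (Pre_f).
def fLoop (s : String) (m : Int) : List Int → Int → Int
  | [], _ => 0
  | j :: rest, c =>
    let x := PySem.List.pyGetD s.toList j '?'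
    let y := PySem.List.pyGetD s.toList (j + m) '?'
    if x != '?' && y != '?' && x != y then
      fLoop s m rest 0
    else
      if c + 1 = m then 1 else fLoop s m rest (c + 1)

def f (s : String) (m : Int) : Int :=
  fLoop s m (PySem.List.pyRange 0 (PySem.Str.len s - m)) 0

-- ===== PORT B =====
-- badB j : the mismatch test of Source B's comprehension.
def badB (s : String) (m : Int) (j : Int) : Bool :=
  let x := PySem.List.pyGetD s.toList j '?'
  let y := PySem.List.pyGetD s.toList (j + m) '?'
  x != '?' && y != '?' && x != y

-- walkB: Source B's loop over mism ++ [n-m] carrying the previous boundary.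
def walkB (m : Int) : List Int → Int → Int
  | [], _ => 0
  | j :: rest, prev => if m ≤ j - prev - 1 then 1 else walkB m rest j

def f_alt (s : String) (m : Int) : Int :=
  if m < 1 then 0
  else
    let n := PySem.Str.len s
    let mism := (PySem.List.pyRange 0 (n - m)).filter (badB s m)
    walkB m (mism ++ [n - m]) (-1)

-- ===== PRECONDITION & SPEC =====
-- Pre_f excludes m < 0, on which A always raises IndexError (the loop indexes past the end of s).
def Pre_f (s : String) (m : Int) : Prop := 0 ≤ m
instance (s : String) (m : Int) : Decidable (Pre_f s m) := by unfold Pre_f; infer_instance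
def pvWitness_f : String × Int := ("aa?a", 2)

-- A raises IndexError for every m < 0; B returns 0 there (no tandem repeat of negative length).
def Raises_f (s : String) (m : Int) : Prop := m < 0
instance (s : String) (m : Int) : Decidable (Raises_f s m) := by unfold Raises_f; infer_instance
def pvRaiseWitness_f : String × Int := ("ab", -1)
def pvRaiseWitnessOut_f : Int := 0

def Spec_f (s : String) (m : Int) (out : Int) : Prop := out = f_alt s m
instance (s : String) (m : Int) (out : Int) : Decidable (Spec_f s m out) := by unfold Spec_f; infer_instance

-- ===== CLAIM (what is proved, stated in full; the proofs are below) =====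
def Claim_equal_f : Prop := ∀ (s : String) (m : Int), Dom_f s m → Pre_f s m → Spec_f s m (f s m)
def Claim_raises_f : Prop := (∀ (s : String) (m : Int), Dom_f s m → Raises_f s m → ¬ Pre_f s m) ∧ (Dom_f (pvRaiseWitness_f.1) (pvRaiseWitness_f.2) ∧ Raises_f (pvRaiseWitness_f.1) (pvRaiseWitness_f.2) ∧ f_alt (pvRaiseWitness_f.1) (pvRaiseWitness_f.2) = pvRaiseWitnessOut_f)

-- ===== LEMMAS AND PROOFS =====

-- With m = 0 the mismatch test compares s[j] with itself, so the counter branch always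
-- runs, and c+1 = 0 never holds once 0 ≤ c: A returns 0.
lemma fLoop_zero (s : String) (l : List Int) (c : Int) (hc : 0 ≤ c) :
    fLoop s 0 l c = 0 := by
  induction l generalizing c with
  | nil => rfl
  | cons j rest ih =>
    simp only [fLoop, add_zero]
    rw [if_neg (by simp), if_neg (by omega)]
    exact ih (c + 1) (by omega)

-- Main invariant: entering A's loop at position a with counter c corresponds to B's walk
-- over the mismatches ≥ a with previous boundary a - c - 1.
lemma fLoop_eq_walkB (s : String) (m L : Int) (hm : 1 ≤ m) :
    ∀ (k : Nat) (a c : Int), (L - a).toNat ≤ k → 0 ≤ c → c < m →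
    fLoop s m (PySem.List.pyRange a L) c
      = walkB m ((PySem.List.pyRange a L).filter (badB s m) ++ [L]) (a - c - 1) := by
  intro k
  induction k with
  | zero =>
    intro a c hk hc0 hcm
    rw [PySem.List.pyRange_one_eq_nil (by omega)]
    simp only [List.filter_nil, List.nil_append, fLoop, walkB]
    rw [if_neg (by omega)]
  | succ k ih =>
    intro a c hk hc0 hcm
    by_cases hal : a < L
    · rw [PySem.List.pyRange_one_cons hal]
      by_cases hb : badB s m a = true
      · -- mismatch at a: A resets the counter, B keeps a as a boundary
        simp only [List.filter_cons, hb]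
        show (if badB s m a then fLoop s m (PySem.List.pyRange (a+1) L) 0
              else if c + 1 = m then 1 else fLoop s m (PySem.List.pyRange (a+1) L) (c+1))
             = walkB m (a :: ((PySem.List.pyRange (a+1) L).filter (badB s m) ++ [L])) (a - c - 1)
        rw [if_pos hb]
        unfold walkB
        rw [if_neg (by omega)]
        have := ih (a + 1) 0 (by omega) le_rfl (by omega)
        simpa using this
      · -- match at a: A increments the counter, B's mismatch list skips a
        simp only [List.filter_cons, hb]
        show (if badB s m a then fLoop s m (PySem.List.pyRange (a+1) L) 0
              else if c + 1 = m then 1 else fLoop s m (PySem.List.pyRange (a+1) L) (c+1))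
             = walkB m ((PySem.List.pyRange (a+1) L).filter (badB s m) ++ [L]) (a - c - 1)
        rw [if_neg hb]
        by_cases hfull : c + 1 = m
        · rw [if_pos hfull]
          -- the next boundary is ≥ a+1, so the gap from a - c - 1 has length ≥ c+1 = m
          cases hfe : (PySem.List.pyRange (a+1) L).filter (badB s m) with
          | nil =>
            simp only [List.nil_append]
            unfold walkB
            rw [if_pos (by omega)]
          | cons h t =>
            have hmem : h ∈ PySem.List.pyRange (a+1) L := by
              have : h ∈ (PySem.List.pyRange (a+1) L).filter (badB s m) := by
                rw [hfe]; exact List.mem_cons_self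
              exact List.mem_of_mem_filter this
            have hha : a + 1 ≤ h := (PySem.List.mem_pyRange_one.mp hmem).1
            simp only [List.cons_append]
            unfold walkB
            rw [if_pos (by omega)]
        · rw [if_neg hfull]
          have := ih (a + 1) (c + 1) (by omega) (by omega) (by omega)
          have hprev : a + 1 - (c + 1) - 1 = a - c - 1 := by ring
          rw [hprev] at this
          exact this
    · rw [PySem.List.pyRange_one_eq_nil (by omega)]
      simp only [List.filter_nil, List.nil_append, fLoop, walkB]
      rw [if_neg (by omega)]

-- ===== VERDICT (by name: the statement is the Claim_ definitions above) =====
theorem f_spec : Claim_equal_f := by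
  intro s m _hdom hpre
  unfold Spec_f f f_alt
  by_cases hm : m < 1
  · have hm0 : m = 0 := by unfold Pre_f at hpre; omega
    subst hm0
    rw [if_pos (by omega)]
    exact fLoop_zero s _ 0 le_rfl
  · rw [if_neg hm]
    have := fLoop_eq_walkB s m (PySem.Str.len s - m) (by omega)
      (PySem.Str.len s - m - 0).toNat 0 0 le_rfl le_rfl (by omega)
    simpa using this

@[simp] theorem f_raises : Claim_raises_f := by
  unfold Claim_raises_f
  constructor
  · intro s m _hdom hr
    unfold Raises_f at hr
    unfold Pre_f
    omega
  · exact ⟨by decide, by decide, by decide⟩
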